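-- pv_equiv track=rewrite | github.com/ewerlonosbadboys-eng/glicemia-ia | escala_app/rules_5x2.py | validate_5x2
-- ===== SOURCE A (Python) =====
-- from typing import List, Tuple
--
-- def validate_5x2(cycle: List[str]) -> Tuple[bool, str]:
--     if len(cycle) != 7:
--         return False, "Ciclo deve ter 7 dias."
--
--     for d in cycle:
--         if d not in ("T", "F"):
--             return False, "Use apenas 'T' ou 'F'."
--
--     work_days = cycle.count("T")
--     off_days = cycle.count("F")
--
--     if work_days > 5:
--         return False, "Inválido: mais de 5 dias de trabalho."
--     if off_days < 2:
--         return False, "Inválido: menos de 2 folgas."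
--
--     streak = 0
--     for d in cycle:
--         if d == "T":
--             streak += 1
--             if streak > 5:
--                 return False, "Inválido: mais de 5 dias seguidos."
--         else:
--             streak = 0
--
--     return True, "OK"
-- ===== SOURCE B (Python) =====
-- def validate_5x2(cycle):
--     # Single fused pass: validates each day, counts work days and tracks the
--     # maximum consecutive-T streak in one loop, then applies the final checks.
--     if len(cycle) != 7:
--         return False, "Ciclo deve ter 7 dias."
--     work = 0
--     streak = 0
--     max_streak = 0
--     for d in cycle:
--         if d == "T":
--             work += 1
--             streak += 1
--             if streak > max_streak:
--                 max_streak = streak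
--         elif d == "F":
--             streak = 0
--         else:
--             return False, "Use apenas 'T' ou 'F'."
--     if work > 5:
--         return False, "Inválido: mais de 5 dias de trabalho."
--     if 7 - work < 2:
--         return False, "Inválido: menos de 2 folgas."
--     if max_streak > 5:
--         return False, "Inválido: mais de 5 dias seguidos."
--     return True, "OK"
-- ===== Notes on version B (the rewrite author's own statement) =====
-- stated objective: alternative
-- what changed: A makes four passes over the list (a validation loop, two .count() scans, and a streak loop with early return); B makes one fused pass that validates, counts work days and tracks the maximum streak together, then applies the same three checks in the same order afterwards (off_days recomputed as 7 - work).
import Mathlib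
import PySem

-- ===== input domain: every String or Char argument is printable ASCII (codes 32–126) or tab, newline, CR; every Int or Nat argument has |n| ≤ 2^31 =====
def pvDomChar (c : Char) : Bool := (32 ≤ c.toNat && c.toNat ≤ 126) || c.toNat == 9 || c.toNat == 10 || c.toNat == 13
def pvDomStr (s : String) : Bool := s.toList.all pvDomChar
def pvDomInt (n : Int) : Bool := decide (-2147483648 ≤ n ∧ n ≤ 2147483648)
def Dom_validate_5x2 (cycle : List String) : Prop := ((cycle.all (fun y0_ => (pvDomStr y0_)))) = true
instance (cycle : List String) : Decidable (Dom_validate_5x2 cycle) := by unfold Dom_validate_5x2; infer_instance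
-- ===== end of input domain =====

-- B merges A's four passes (char-validation loop, two .count scans, streak loop) into one
-- fused pass with the same final checks; same values everywhere (objective: alternative).

-- ===== PORT A =====
-- first loop of A: returns the early result at the first day not in ("T","F")
def aBadDay : List String → Option (Bool × String)
  | [] => none
  | d :: rest =>
    if d ≠ "T" ∧ d ≠ "F" then some (false, "Use apenas 'T' ou 'F'.")
    else aBadDay rest

-- second loop of A: streak counter with early return when streak > 5
def aStreak : List String → Int → Option (Bool × String)
  | [], _ => none
  | d :: rest, streak =>
    if d = "T" then
      if streak + 1 > 5 then some (false, "Inválido: mais de 5 dias seguidos.")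
      else aStreak rest (streak + 1)
    else aStreak rest 0

def validate_5x2 (cycle : List String) : Bool × String :=
  if cycle.length ≠ 7 then (false, "Ciclo deve ter 7 dias.")
  else
    match aBadDay cycle with
    | some r => r
    | none =>
      let work_days : Int := PySem.List.count cycle "T"
      let off_days : Int := PySem.List.count cycle "F"
      if work_days > 5 then (false, "Inválido: mais de 5 dias de trabalho.")
      else if off_days < 2 then (false, "Inválido: menos de 2 folgas.")
      else
        match aStreak cycle 0 with
        | some r => r
        | none => (true, "OK")

-- ===== PORT B =====
-- B's single loop: work counter, running streak, max streak; early return on a bad day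
def bLoop : List String → Int → Int → Int → Bool × String
  | [], work, _streak, max_streak =>
    if work > 5 then (false, "Inválido: mais de 5 dias de trabalho.")
    else if 7 - work < 2 then (false, "Inválido: menos de 2 folgas.")
    else if max_streak > 5 then (false, "Inválido: mais de 5 dias seguidos.")
    else (true, "OK")
  | d :: rest, work, streak, max_streak =>
    if d = "T" then
      bLoop rest (work + 1) (streak + 1)
        (if streak + 1 > max_streak then streak + 1 else max_streak)
    else if d = "F" then bLoop rest work 0 max_streak
    else (false, "Use apenas 'T' ou 'F'.")

def validate_5x2_alt (cycle : List String) : Bool × String :=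
  if cycle.length ≠ 7 then (false, "Ciclo deve ter 7 dias.")
  else bLoop cycle 0 0 0

-- ===== PRECONDITION & SPEC =====
def Spec_validate_5x2 (cycle : List String) (out : Bool × String) : Prop := out = validate_5x2_alt cycle
instance (cycle : List String) (out : Bool × String) : Decidable (Spec_validate_5x2 cycle out) := by unfold Spec_validate_5x2; infer_instance

-- ===== CLAIM (what is proved, stated in full; the proofs are below) =====
def Claim_equal_validate_5x2 : Prop := ∀ (cycle : List String), Dom_validate_5x2 cycle → Spec_validate_5x2 cycle (validate_5x2 cycle)

-- ===== LEMMAS AND PROOFS =====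

-- if some day is bad, A's first loop and B's loop both return the same early result
theorem bad_case (l : List String) (h : ∃ d ∈ l, d ≠ "T" ∧ d ≠ "F") :
    aBadDay l = some (false, "Use apenas 'T' ou 'F'.") ∧
    ∀ w s m, bLoop l w s m = (false, "Use apenas 'T' ou 'F'.") := by
  induction l with
  | nil => simp at h
  | cons d rest ih =>
    by_cases hd : d ≠ "T" ∧ d ≠ "F"
    · constructor
      · simp [aBadDay, hd]
      · intro w s m
        simp [bLoop, hd.1, hd.2]
    · have hrest : ∃ x ∈ rest, x ≠ "T" ∧ x ≠ "F" := by
        rcases h with ⟨x, hx, hxp⟩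
        rcases List.mem_cons.mp hx with rfl | hx'
        · exact absurd hxp hd
        · exact ⟨x, hx', hxp⟩
      obtain ⟨h1, h2⟩ := ih hrest
      constructor
      · simpa [aBadDay, hd] using h1
      · intro w s m
        rcases not_and_or.mp hd with hT | hF
        · simp only [ne_eq, not_not] at hT
          simpa [bLoop, hT] using h2 (w + 1) (s + 1) _
        · simp only [ne_eq, not_not] at hF
          by_cases hT : d = "T"
          · simpa [bLoop, hT] using h2 (w + 1) (s + 1) _
          · simpa [bLoop, hT, hF] using h2 w 0 m

-- aStreak only ever returns this one result
theorem aStreak_some (l : List String) (s : Int) (r : Bool × String)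
    (h : aStreak l s = some r) : r = (false, "Inválido: mais de 5 dias seguidos.") := by
  induction l generalizing s with
  | nil => simp [aStreak] at h
  | cons d rest ih =>
    by_cases hd : d = "T"
    · by_cases hs : s + 1 > 5
      · simp [aStreak, hd, hs] at h
        exact h.symm
      · simp only [aStreak, hd, if_true, if_neg hs] at h
        exact ih (s + 1) h
    · simp only [aStreak, hd, if_false] at h
      exact ih 0 h

-- characterisation of B's loop when every remaining day is good
theorem bLoop_good (l : List String) (hg : ∀ d ∈ l, d = "T" ∨ d = "F")
    (w s m : Int) :
    bLoop l w s m =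
      (if w + (l.count "T" : Int) > 5 then (false, "Inválido: mais de 5 dias de trabalho.")
       else if 7 - (w + (l.count "T" : Int)) < 2 then (false, "Inválido: menos de 2 folgas.")
       else if m > 5 ∨ (aStreak l s).isSome then (false, "Inválido: mais de 5 dias seguidos.")
       else (true, "OK")) := by
  induction l generalizing w s m with
  | nil => simp [bLoop, aStreak]
  | cons d rest ih =>
    have hrest : ∀ x ∈ rest, x = "T" ∨ x = "F" := fun x hx => hg x (List.mem_cons_of_mem d hx)
    rcases hg d (List.mem_cons_self ..) with hT | hF
    · subst hT
      rw [show bLoop ("T" :: rest) w s m =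
            bLoop rest (w + 1) (s + 1) (if s + 1 > m then s + 1 else m) by simp [bLoop]]
      rw [ih hrest]
      have hcnt : (("T" :: rest).count "T" : Int) = (rest.count "T" : Int) + 1 := by
        simp
      rw [hcnt]
      have harith : w + ((rest.count "T" : Int) + 1) = w + 1 + (rest.count "T" : Int) := by ring
      rw [harith]
      by_cases hw : w + 1 + (rest.count "T" : Int) > 5
      · simp [hw]
      · simp only [hw, if_false]
        by_cases ho : 7 - (w + 1 + (rest.count "T" : Int)) < 2
        · simp [ho]
        · simp only [ho, if_false]
          have hstreak : ((if s + 1 > m then s + 1 else m) > 5 ∨ (aStreak rest (s + 1)).isSome)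
              ↔ (m > 5 ∨ (aStreak ("T" :: rest) s).isSome) := by
            by_cases hs : s + 1 > 5
            · simp [aStreak, hs]; omega
            · simp [aStreak, hs]
              constructor
              · rintro (h1 | h2)
                · left; omega
                · right; exact h2
              · rintro (h1 | h2)
                · left; omega
                · right; exact h2
          by_cases hc : m > 5 ∨ (aStreak ("T" :: rest) s).isSome
          · rw [if_pos (hstreak.mpr hc), if_pos hc]
          · have hnc : ¬ ((if s + 1 > m then s + 1 else m) > 5 ∨ (aStreak rest (s + 1)).isSome) :=
              fun h => hc (hstreak.mp h)
            rw [if_neg hnc, if_neg hc]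
    · subst hF
      rw [show bLoop ("F" :: rest) w s m = bLoop rest w 0 m by simp [bLoop]]
      rw [ih hrest]
      simp [aStreak]

theorem all_good_of_badDay_none (l : List String) (h : aBadDay l = none) :
    ∀ d ∈ l, d = "T" ∨ d = "F" := by
  induction l with
  | nil => simp
  | cons d rest ih =>
    by_cases hd : d ≠ "T" ∧ d ≠ "F"
    · simp [aBadDay, hd] at h
    · intro x hx
      rcases List.mem_cons.mp hx with rfl | hx'
      · rcases not_and_or.mp hd with h1 | h1 <;> simp at h1 <;> tauto
      · exact ih (by simpa [aBadDay, hd] using h) x hx'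

theorem aBadDay_none (l : List String) (h : ¬ ∃ d ∈ l, d ≠ "T" ∧ d ≠ "F") :
    aBadDay l = none := by
  induction l with
  | nil => rfl
  | cons d rest ih =>
    by_cases hd : d ≠ "T" ∧ d ≠ "F"
    · exact absurd ⟨d, List.mem_cons_self .., hd⟩ h
    · rw [aBadDay, if_neg hd]
      exact ih fun ⟨x, hx1, hx2⟩ => h ⟨x, List.mem_cons_of_mem d hx1, hx2⟩

-- count T + count F = length when every element is T or F
theorem count_add_count (l : List String) (hg : ∀ d ∈ l, d = "T" ∨ d = "F") :
    l.count "T" + l.count "F" = l.length := by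
  induction l with
  | nil => simp
  | cons d rest ih =>
    have hrest := fun x hx => hg x (List.mem_cons_of_mem d hx)
    have hr := ih hrest
    rcases hg d (List.mem_cons_self ..) with h | h <;> subst h <;>
      simp only [List.count_cons, List.length_cons] <;> simp <;> omega

-- ===== VERDICT (by name: the statement is the Claim_ definition above) =====
theorem validate_5x2_spec : Claim_equal_validate_5x2 := by
  intro cycle _
  unfold Spec_validate_5x2 validate_5x2 validate_5x2_alt
  by_cases hlen : cycle.length ≠ 7
  · simp [hlen]
  · simp only [hlen, if_false]
    rw [not_not] at hlen
    by_cases hbad : ∃ d ∈ cycle, d ≠ "T" ∧ d ≠ "F"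
    · obtain ⟨h1, h2⟩ := bad_case cycle hbad
      rw [h1, h2]
    · have hnone : aBadDay cycle = none := aBadDay_none cycle hbad
      have hg := all_good_of_badDay_none cycle hnone
      rw [hnone]
      rw [bLoop_good cycle hg 0 0 0]
      have hcnt := count_add_count cycle hg
      rw [hlen] at hcnt
      simp only [PySem.List.count_eq, zero_add]
      have e : 7 - (cycle.count "T" : Int) = (cycle.count "F" : Int) := by omega
      rw [e]
      by_cases hw : (cycle.count "T" : Int) > 5
      · simp [hw]
      · simp only [hw, if_false]
        by_cases ho : (cycle.count "F" : Int) < 2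
        · simp [ho]
        · simp only [ho, if_false]
          cases hst : aStreak cycle 0 with
          | none => simp
          | some r =>
            rw [aStreak_some cycle 0 r hst]
            simp
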